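-- pv_equiv track=rewrite | github.com/nbang/agent-demo | src/agents/multi_agent/workflows/content_workflow.py | _apply_clarity_fixes
-- ===== SOURCE A (Python) =====
-- def _apply_clarity_fixes(content: str) -> str:
--     """Apply basic clarity improvements."""
--     # Replace wordy phrases
--     clarity_fixes = {
--         "in order to": "to",
--         "due to the fact that": "because",
--         "at this point in time": "now"
--     }
--
--     for wordy, concise in clarity_fixes.items():
--         content = content.replace(wordy, concise)
--
--     return content
-- ===== SOURCE B (Python) =====
-- def _apply_clarity_fixes(content: str) -> str:
--     """Apply basic clarity improvements in a single left-to-right scan."""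
--     fixes = (("in order to", "to"),
--              ("due to the fact that", "because"),
--              ("at this point in time", "now"))
--
--     out = []
--     i = 0
--     n = len(content)
--     while i < n:
--         for wordy, concise in fixes:
--             if content.startswith(wordy, i):
--                 out.append(concise)
--                 i += len(wordy)
--                 break
--         else:
--             out.append(content[i])
--             i += 1
--     return "".join(out)
-- ===== Notes on version B (the rewrite author's own statement) =====
-- stated objective: alternative
-- what changed: A makes three sequential full str.replace passes (each pass re-scans the previous pass's output); B does one left-to-right scan that tries the three wordy phrases at each position and never re-scans replaced output.
-- intended difference: On inputs containing a cascade pattern such as 'due in order to the fact that' (where A's first replacement creates a new occurrence of the second wordy phrase), A's later pass collapses it further and returns 'because' there, while B returns the direct single-pass replacement 'due to the fact that'; the single-pass result is the intended reading of replacing each wordy phrase of the original text, not an artefact of A's pass ordering. — e.g. on _apply_clarity_fixes("due in order to the fact that"): A returns "because", B returns "due to the fact that"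
import Mathlib
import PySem

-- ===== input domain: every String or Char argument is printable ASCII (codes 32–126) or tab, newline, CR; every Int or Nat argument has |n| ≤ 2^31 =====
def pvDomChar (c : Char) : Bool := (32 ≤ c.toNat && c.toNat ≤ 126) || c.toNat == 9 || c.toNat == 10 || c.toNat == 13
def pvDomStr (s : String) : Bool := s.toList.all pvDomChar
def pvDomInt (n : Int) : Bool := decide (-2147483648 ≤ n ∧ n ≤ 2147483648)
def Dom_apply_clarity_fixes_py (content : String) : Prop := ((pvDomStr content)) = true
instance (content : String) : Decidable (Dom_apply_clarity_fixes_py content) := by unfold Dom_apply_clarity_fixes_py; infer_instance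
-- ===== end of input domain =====

-- B replaces A's three sequential str.replace passes by a single left-to-right scan that
-- tries the three phrases at each position (alternative decomposition, same cost); on the
-- exceptional inputs D_ where A's later passes re-match text created by the first pass,
-- B intentionally returns the single-pass (non-cascading) result.


-- ===== PORT A =====
-- A's loop over the dict applies str.replace once per (wordy, concise) pair, in insertion
-- order; ported as the three sequential PySem.Str.replace calls.
def apply_clarity_fixes_py (content : String) : String :=
  PySem.Str.replace
    (PySem.Str.replace
      (PySem.Str.replace content "in order to" "to")
      "due to the fact that" "because")
    "at this point in time" "now"

-- ===== PORT B =====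
-- the dict keys/values of Source B, as character lists
def pvP1 : List Char := ['i', 'n', ' ', 'o', 'r', 'd', 'e', 'r', ' ', 't', 'o']
def pvR1 : List Char := ['t', 'o']
def pvP2 : List Char := ['d', 'u', 'e', ' ', 't', 'o', ' ', 't', 'h', 'e', ' ', 'f', 'a', 'c', 't', ' ', 't', 'h', 'a', 't']
def pvR2 : List Char := ['b', 'e', 'c', 'a', 'u', 's', 'e']
def pvP3 : List Char := ['a', 't', ' ', 't', 'h', 'i', 's', ' ', 'p', 'o', 'i', 'n', 't', ' ', 'i', 'n', ' ', 't', 'i', 'm', 'e']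
def pvR3 : List Char := ['n', 'o', 'w']

-- Source B's while loop: the index i is the list of remaining characters; content.startswith(wordy, i)
-- is exactly List.isPrefixOf on the remaining characters (exact on every input); on a match the
-- loop emits the concise phrase and advances i by len(wordy), else copies one character.
-- the loop runs at most once per remaining character, so it is ported with the character
-- count as structural fuel (same style as PySem.Chars.replace.go).
def pvScanGo : Nat → List Char → List Char
  | 0, l => l
  | _, [] => []
  | fuel + 1, c :: t =>
    if List.isPrefixOf pvP1 (c :: t) then pvR1 ++ pvScanGo fuel (t.drop 10)
    else if List.isPrefixOf pvP2 (c :: t) then pvR2 ++ pvScanGo fuel (t.drop 19)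
    else if List.isPrefixOf pvP3 (c :: t) then pvR3 ++ pvScanGo fuel (t.drop 20)
    else c :: pvScanGo fuel t

def apply_clarity_fixes_py_alt (content : String) : String :=
  String.ofList (pvScanGo content.toList.length content.toList)

-- ===== PRECONDITION & SPEC =====
-- On inputs containing a cascade pattern such as 'due in order to the fact that' (where A's
-- first replacement creates a new occurrence of the second wordy phrase), A's later pass
-- collapses it further and returns 'because' there, while B returns the direct single-pass
-- replacement 'due to the fact that'; the single-pass result is the intended reading of
-- replacing each wordy phrase of the original text, not an artefact of A's pass ordering.
def D_apply_clarity_fixes_py (content : String) : Prop :=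
  PySem.Str.isIn "due in order to the fact that" content = true ∨
  PySem.Str.isIn "due to the fact thain order to" content = true ∨
  PySem.Str.isIn "due in order to the fact thain order to" content = true
instance (content : String) : Decidable (D_apply_clarity_fixes_py content) := by
  unfold D_apply_clarity_fixes_py; infer_instance

def Spec_apply_clarity_fixes_py (content : String) (out : String) : Prop :=
  ¬ D_apply_clarity_fixes_py content → out = apply_clarity_fixes_py_alt content
instance (content : String) (out : String) : Decidable (Spec_apply_clarity_fixes_py content out) := by
  unfold Spec_apply_clarity_fixes_py; infer_instance

def pvDiffWitness_apply_clarity_fixes_py : String := "due in order to the fact that"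
def pvDiffWitnessOut_apply_clarity_fixes_py : String × String := ("because", "due to the fact that")

-- ===== CLAIM (what is proved, stated in full; the proofs are below) =====
def Claim_unchanged_apply_clarity_fixes_py : Prop := ∀ (content : String), Dom_apply_clarity_fixes_py content → Spec_apply_clarity_fixes_py content (apply_clarity_fixes_py content)
def Claim_exact_apply_clarity_fixes_py : Prop := ∀ (content : String), Dom_apply_clarity_fixes_py content → D_apply_clarity_fixes_py content → apply_clarity_fixes_py content ≠ apply_clarity_fixes_py_alt content
def Claim_changed_apply_clarity_fixes_py : Prop := Dom_apply_clarity_fixes_py (pvDiffWitness_apply_clarity_fixes_py) ∧ D_apply_clarity_fixes_py (pvDiffWitness_apply_clarity_fixes_py) ∧ apply_clarity_fixes_py (pvDiffWitness_apply_clarity_fixes_py) = pvDiffWitnessOut_apply_clarity_fixes_py.1 ∧ apply_clarity_fixes_py_alt (pvDiffWitness_apply_clarity_fixes_py) = pvDiffWitnessOut_apply_clarity_fixes_py.2 ∧ pvDiffWitnessOut_apply_clarity_fixes_py.1 ≠ pvDiffWitnessOut_apply_clarity_fixes_py.2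

-- ===== LEMMAS AND PROOFS =====

-- the cascade patterns: inputs on which A's first pass ("in order to" -> "to") creates a new
-- occurrence of "due to the fact that" that A's second pass then also replaces
def pvB1 : List Char := ['d', 'u', 'e', ' ', 'i', 'n', ' ', 'o', 'r', 'd', 'e', 'r', ' ', 't', 'o', ' ', 't', 'h', 'e', ' ', 'f', 'a', 'c', 't', ' ', 't', 'h', 'a', 't']
def pvB2 : List Char := ['d', 'u', 'e', ' ', 't', 'o', ' ', 't', 'h', 'e', ' ', 'f', 'a', 'c', 't', ' ', 't', 'h', 'a', 'i', 'n', ' ', 'o', 'r', 'd', 'e', 'r', ' ', 't', 'o']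
def pvB3 : List Char := ['d', 'u', 'e', ' ', 'i', 'n', ' ', 'o', 'r', 'd', 'e', 'r', ' ', 't', 'o', ' ', 't', 'h', 'e', ' ', 'f', 'a', 'c', 't', ' ', 't', 'h', 'a', 'i', 'n', ' ', 'o', 'r', 'd', 'e', 'r', ' ', 't', 'o']


-- Python's str.replace (PySem.Chars.replace.go is fuel+accumulator based) as a clean
-- structural recursion, for a nonempty pattern.
def pvRep (old new : List Char) : List Char → List Char
  | [] => []
  | c :: t =>
    if List.isPrefixOf old (c :: t) then new ++ pvRep old new (t.drop (old.length - 1))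
    else c :: pvRep old new t
termination_by l => l.length
decreasing_by
  · simp [List.length_drop]
  · simp

-- the single-pass scan as a clean well-founded recursion (proof layer for pvScanGo)
def pvScan : List Char → List Char
  | [] => []
  | c :: t =>
    if List.isPrefixOf pvP1 (c :: t) then pvR1 ++ pvScan (t.drop 10)
    else if List.isPrefixOf pvP2 (c :: t) then pvR2 ++ pvScan (t.drop 19)
    else if List.isPrefixOf pvP3 (c :: t) then pvR3 ++ pvScan (t.drop 20)
    else c :: pvScan t
termination_by l => l.length
decreasing_by
  · simp [List.length_drop]
  · simp [List.length_drop]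
  · simp [List.length_drop]
  · simp

theorem pvScanGo_eq : ∀ fuel l, l.length ≤ fuel → pvScanGo fuel l = pvScan l := by
  intro fuel
  induction fuel with
  | zero =>
    intro l hl
    have : l = [] := List.eq_nil_of_length_eq_zero (Nat.le_zero.1 hl)
    subst this
    simp [pvScanGo, pvScan]
  | succ n ih =>
    intro l hl
    cases l with
    | nil => simp [pvScanGo, pvScan]
    | cons c t =>
      have hlen : t.length ≤ n := by
        have : (c :: t).length = t.length + 1 := by simp
        omega
      have hd : ∀ k, (t.drop k).length ≤ n := by
        intro k
        have := List.length_drop (l := t) (i := k)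
        omega
      rw [pvScanGo, pvScan]
      rw [ih (t.drop 10) (hd 10), ih (t.drop 19) (hd 19), ih (t.drop 20) (hd 20), ih t hlen]

theorem pvGo_eq (old new : List Char) (hold : old ≠ []) :
    ∀ fuel l acc, l.length ≤ fuel →
      PySem.Chars.replace.go old new fuel l acc = acc.reverse ++ pvRep old new l := by
  obtain ⟨a, b, rfl⟩ : ∃ a b, old = a :: b := by
    cases old with
    | nil => exact absurd rfl hold
    | cons a b => exact ⟨a, b, rfl⟩
  intro fuel
  induction fuel with
  | zero =>
    intro l acc hl
    have : l = [] := List.eq_nil_of_length_eq_zero (Nat.le_zero.1 hl)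
    subst this
    simp [PySem.Chars.replace.go, pvRep]
  | succ n ih =>
    intro l acc hl
    cases l with
    | nil => simp [PySem.Chars.replace.go, pvRep]
    | cons c t =>
      rw [PySem.Chars.replace.go]
      by_cases hp : List.isPrefixOf (a :: b) (c :: t)
      · rw [if_pos hp]
        have hdrop : List.drop (a :: b).length (c :: t) = t.drop ((a :: b).length - 1) := by
          simp
        rw [hdrop, ih (t.drop ((a :: b).length - 1)) (new.reverse ++ acc) (by
          have h1 := List.length_drop (l := t) (i := (a :: b).length - 1)
          have h2 : (c :: t).length = t.length + 1 := by simp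
          omega)]
        rw [pvRep, if_pos hp]
        simp
      · rw [if_neg hp, ih t (c :: acc) (by
          have : (c :: t).length = t.length + 1 := by simp
          omega)]
        rw [pvRep, if_neg hp]
        simp

theorem pvReplace_eq (s old new : List Char) (hold : old ≠ []) :
    PySem.Chars.replace s old new = pvRep old new s := by
  rw [PySem.Chars.replace, if_neg (by simpa using hold)]
  simpa using pvGo_eq old new hold s.length s [] (Nat.le_refl _)


-- "in order to".toList etc as the char-list constants
theorem pvT1 : "in order to".toList = pvP1 := by decide
theorem pvT2 : "due to the fact that".toList = pvP2 := by decide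
theorem pvT3 : "at this point in time".toList = pvP3 := by decide

theorem pvA_eq (content : String) :
    apply_clarity_fixes_py content =
      String.ofList (pvRep pvP3 pvR3 (pvRep pvP2 pvR2 (pvRep pvP1 pvR1 content.toList))) := by
  rw [apply_clarity_fixes_py]
  simp only [PySem.Str.replace, String.toList_ofList]
  rw [pvT1, pvT2, pvT3, pvReplace_eq _ _ _ (by decide), pvReplace_eq _ _ _ (by decide),
    pvReplace_eq _ _ _ (by decide)]
  rw [show "to".toList = pvR1 from by decide, show "because".toList = pvR2 from by decide,
    show "now".toList = pvR3 from by decide]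

theorem pvAlt_eq (content : String) :
    apply_clarity_fixes_py_alt content = String.ofList (pvScan content.toList) := by
  rw [apply_clarity_fixes_py_alt, pvScanGo_eq _ _ (Nat.le_refl _)]

-- one copy step of a replace pass: if the produced head differs from the replacement's head,
-- the pass copied the input's head
theorem pvRep_copy {old ntl s out : List Char} {n0 c : Char}
    (h : pvRep old (n0 :: ntl) s = c :: out) (hc : c ≠ n0) :
    ∃ t, s = c :: t ∧ pvRep old (n0 :: ntl) t = out := by
  cases s with
  | nil => rw [pvRep] at h; exact absurd h (by simp)
  | cons a t =>
    rw [pvRep] at h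
    by_cases hp : List.isPrefixOf old (a :: t)
    · rw [if_pos hp] at h
      simp only [List.cons_append, List.cons.injEq] at h
      exact absurd h.1.symm hc
    · rw [if_neg hp] at h
      injection h with h1 h2
      exact ⟨t, by rw [h1], h2⟩

theorem pvF1_copy {s out : List Char} {c : Char}
    (h : pvRep pvP1 pvR1 s = c :: out) (hc : c ≠ 't') :
    ∃ t, s = c :: t ∧ pvRep pvP1 pvR1 t = out :=
  pvRep_copy h hc

theorem pvF2_copy {s out : List Char} {c : Char}
    (h : pvRep pvP2 pvR2 s = c :: out) (hc : c ≠ 'b') :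
    ∃ t, s = c :: t ∧ pvRep pvP2 pvR2 t = out :=
  pvRep_copy h hc

-- a 't' produced by the first pass is either a copied 't' or the start of an emitted "to"
theorem pvF1_t {s out : List Char} (h : pvRep pvP1 pvR1 s = 't' :: out) :
    (∃ t, s = 't' :: t ∧ pvRep pvP1 pvR1 t = out) ∨
    (∃ t, s = pvP1 ++ t ∧ out = 'o' :: pvRep pvP1 pvR1 t) := by
  cases s with
  | nil => rw [pvRep] at h; exact absurd h (by simp)
  | cons a t =>
    by_cases hp : List.isPrefixOf pvP1 (a :: t)
    · right
      obtain ⟨u, hu⟩ := (PySem.Chars.startswith_iff (a :: t) pvP1).mp hp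
      simp only [pvP1, List.cons_append, List.nil_append, List.cons.injEq] at hu
      obtain ⟨ha, ht⟩ := hu
      subst ha
      rw [pvRep, if_pos hp] at h
      rw [show pvP1.length - 1 = 10 from rfl] at h
      have hdrop : t.drop 10 = u := by rw [← ht]; simp
      rw [hdrop] at h
      refine ⟨u, by rw [← ht]; simp [pvP1], ?_⟩
      simp only [pvR1, List.cons_append, List.nil_append, List.cons.injEq] at h
      exact h.2.symm
    · left
      rw [pvRep, if_neg hp] at h
      injection h with h1 h2
      exact ⟨t, by rw [h1], h2⟩

-- a produced 't' whose successor is not 'o' must be a copied 't'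
theorem pvF1_t_ne {s out : List Char} {c : Char}
    (h : pvRep pvP1 pvR1 s = 't' :: c :: out) (hc : c ≠ 'o') :
    ∃ t, s = 't' :: t ∧ pvRep pvP1 pvR1 t = c :: out := by
  rcases pvF1_t h with ⟨t, h1, h2⟩ | ⟨t, h1, h2⟩
  · exact ⟨t, h1, h2⟩
  · injection h2 with h3 _
    exact absurd h3 hc

-- if pass 1 puts "due to the fact that" at the front of its output, the input began with
-- that phrase or with one of the three cascade patterns
theorem pvPull2 {s : List Char} (h : pvP2 <+: pvRep pvP1 pvR1 s) :
    pvP2 <+: s ∨ pvB1 <+: s ∨ pvB2 <+: s ∨ pvB3 <+: s := by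
  obtain ⟨junk, hj⟩ := h
  have h : pvRep pvP1 pvR1 s =
      'd'::'u'::'e'::' '::'t'::'o'::' '::'t'::'h'::'e'::' '::'f'::'a'::'c'::'t'::' '::'t'::'h'::'a'::'t'::junk := by
    rw [← hj]; simp [pvP2]
  -- "due " contains no 't': four copy steps
  repeat (replace h := pvF1_copy h (by decide); obtain ⟨_, rfl, h⟩ := h)
  replace h := pvF1_t h
  rcases h with ⟨u, rfl, h⟩ | ⟨u, rfl, h⟩
  · -- the 't' of "due to" was a copied 't'
    repeat first
      | (replace h := pvF1_copy h (by decide); obtain ⟨_, rfl, h⟩ := h)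
      | (replace h := pvF1_t_ne h (by decide); obtain ⟨_, rfl, h⟩ := h)
    replace h := pvF1_t h
    rcases h with ⟨v, rfl, -⟩ | ⟨v, rfl, -⟩
    · exact Or.inl ⟨v, by simp [pvP2]⟩
    · exact Or.inr (Or.inr (Or.inl ⟨v, by simp [pvB2, pvP1]⟩))
  · -- the "to" of "due to" was emitted from an "in order to"
    injection h with h1 h
    replace h := h.symm
    repeat first
      | (replace h := pvF1_copy h (by decide); obtain ⟨_, rfl, h⟩ := h)
      | (replace h := pvF1_t_ne h (by decide); obtain ⟨_, rfl, h⟩ := h)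
    replace h := pvF1_t h
    rcases h with ⟨v, rfl, -⟩ | ⟨v, rfl, -⟩
    · exact Or.inr (Or.inl ⟨v, by simp [pvB1, pvP1]⟩)
    · exact Or.inr (Or.inr (Or.inr ⟨v, by simp [pvB3, pvP1]⟩))

-- pass 1 cannot create "at this point in time" at the front ("to" fits nowhere in it)
theorem pvPull3a {s : List Char} (h : pvP3 <+: pvRep pvP1 pvR1 s) : pvP3 <+: s := by
  obtain ⟨junk, hj⟩ := h
  have h : pvRep pvP1 pvR1 s =
      'a'::'t'::' '::'t'::'h'::'i'::'s'::' '::'p'::'o'::'i'::'n'::'t'::' '::'i'::'n'::' '::'t'::'i'::'m'::'e'::junk := by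
    rw [← hj]; simp [pvP3]
  repeat first
    | (replace h := pvF1_copy h (by decide); obtain ⟨_, rfl, h⟩ := h)
    | (replace h := pvF1_t_ne h (by decide); obtain ⟨_, rfl, h⟩ := h)
  rename_i w
  exact ⟨w, by simp [pvP3]⟩

-- pass 2 cannot create "at this point in time" at the front (no 'b' in it)
theorem pvPull3b {s : List Char} (h : pvP3 <+: pvRep pvP2 pvR2 s) : pvP3 <+: s := by
  obtain ⟨junk, hj⟩ := h
  have h : pvRep pvP2 pvR2 s =
      'a'::'t'::' '::'t'::'h'::'i'::'s'::' '::'p'::'o'::'i'::'n'::'t'::' '::'i'::'n'::' '::'t'::'i'::'m'::'e'::junk := by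
    rw [← hj]; simp [pvP3]
  repeat (replace h := pvF2_copy h (by decide); obtain ⟨_, rfl, h⟩ := h)
  rename_i w
  exact ⟨w, by simp [pvP3]⟩


-- a prefix of a concatenation is a prefix of the first part or extends it
theorem pvPrefixAppendCases {b x u : List Char} (h : b <+: x ++ u) : b <+: x ∨ x <+: b := by
  obtain ⟨r, hr⟩ := h
  rcases List.append_eq_append_iff.mp hr with ⟨a', ha, -⟩ | ⟨c', hc, -⟩
  · exact Or.inl ⟨a', ha.symm ▸ rfl⟩
  · exact Or.inr ⟨c', hc.symm⟩

-- an occurrence of b in p ++ u that can neither sit inside p nor straddle its end lies in u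
theorem pvNoStraddle (p b : List Char)
    (hch : ∀ j, j < p.length → ¬ b <+: p.drop j ∧ ¬ p.drop j <+: b)
    {u : List Char} (h : b <:+: p ++ u) : b <:+: u := by
  obtain ⟨j, hj⟩ := (PySem.Chars.exists_prefix_drop_iff_isIn b (p ++ u)).mpr
    ((PySem.Chars.isIn_iff_infix b (p ++ u)).mpr h)
  by_cases hlt : j < p.length
  · rw [List.drop_append_of_le_length (Nat.le_of_lt hlt)] at hj
    rcases pvPrefixAppendCases hj with hx | hx
    · exact absurd hx (hch j hlt).1
    · exact absurd hx (hch j hlt).2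
  · rw [show j = p.length + (j - p.length) from by omega, List.drop_length_add_append] at hj
    exact hj.isInfix.trans (List.drop_suffix _ _).isInfix

-- when nothing matches at the head, all three of A's passes copy the head character
theorem pvCopyA {c : Char} {t : List Char}
    (hc1 : ¬ List.isPrefixOf pvP1 (c :: t) = true)
    (hc2 : ¬ List.isPrefixOf pvP2 (c :: t) = true)
    (hc3 : ¬ List.isPrefixOf pvP3 (c :: t) = true)
    (hb1 : ¬ pvB1 <+: c :: t) (hb2 : ¬ pvB2 <+: c :: t) (hb3 : ¬ pvB3 <+: c :: t) :
    pvRep pvP3 pvR3 (pvRep pvP2 pvR2 (pvRep pvP1 pvR1 (c :: t))) =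
      c :: pvRep pvP3 pvR3 (pvRep pvP2 pvR2 (pvRep pvP1 pvR1 t)) := by
  have e1 : pvRep pvP1 pvR1 (c :: t) = c :: pvRep pvP1 pvR1 t := by
    rw [pvRep, if_neg hc1]
  have hP2 : ¬ List.isPrefixOf pvP2 (c :: pvRep pvP1 pvR1 t) = true := by
    intro hx
    have hx' : pvP2 <+: pvRep pvP1 pvR1 (c :: t) := by
      rw [e1]; exact (PySem.Chars.startswith_iff _ _).mp hx
    rcases pvPull2 hx' with h | h | h | h
    · exact hc2 ((PySem.Chars.startswith_iff _ _).mpr h)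
    · exact hb1 h
    · exact hb2 h
    · exact hb3 h
  have e2 : pvRep pvP2 pvR2 (c :: pvRep pvP1 pvR1 t) =
      c :: pvRep pvP2 pvR2 (pvRep pvP1 pvR1 t) := by
    rw [pvRep, if_neg hP2]
  have hP3 : ¬ List.isPrefixOf pvP3 (c :: pvRep pvP2 pvR2 (pvRep pvP1 pvR1 t)) = true := by
    intro hx
    have hx' : pvP3 <+: pvRep pvP2 pvR2 (pvRep pvP1 pvR1 (c :: t)) := by
      rw [e1, e2]; exact (PySem.Chars.startswith_iff _ _).mp hx
    exact hc3 ((PySem.Chars.startswith_iff _ _).mpr (pvPull3a (pvPull3b hx')))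
  have e3 : pvRep pvP3 pvR3 (c :: pvRep pvP2 pvR2 (pvRep pvP1 pvR1 t)) =
      c :: pvRep pvP3 pvR3 (pvRep pvP2 pvR2 (pvRep pvP1 pvR1 t)) := by
    rw [pvRep, if_neg hP3]
  rw [e1, e2, e3]

-- the heart: outside the cascade patterns, the three passes equal the single scan
theorem pvMainAux : ∀ n s, List.length s ≤ n → ¬ pvB1 <:+: s → ¬ pvB2 <:+: s → ¬ pvB3 <:+: s →
    pvRep pvP3 pvR3 (pvRep pvP2 pvR2 (pvRep pvP1 pvR1 s)) = pvScan s := by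
  intro n
  induction n with
  | zero =>
    intro s hs _ _ _
    have : s = [] := List.eq_nil_of_length_eq_zero (Nat.le_zero.1 hs)
    subst this
    simp [pvRep, pvScan]
  | succ n ih =>
    intro s hs h1 h2 h3
    cases s with
    | nil => simp [pvRep, pvScan]
    | cons c t =>
      have hlt : t.length ≤ n := by
        have : (c :: t).length = t.length + 1 := by simp
        omega
      by_cases hc1 : List.isPrefixOf pvP1 (c :: t)
      · obtain ⟨u, hu⟩ := (PySem.Chars.startswith_iff (c :: t) pvP1).mp hc1
        have hul : u.length ≤ n := by
          have := congrArg List.length hu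
          simp [pvP1] at this
          omega
        have hrec := ih u hul
          (fun hx => h1 (by rw [← hu]; exact hx.trans (List.suffix_append _ _).isInfix))
          (fun hx => h2 (by rw [← hu]; exact hx.trans (List.suffix_append _ _).isInfix))
          (fun hx => h3 (by rw [← hu]; exact hx.trans (List.suffix_append _ _).isInfix))
        rw [← hu]
        simp [pvRep, pvScan, pvP1, pvP2, pvP3, pvR1, pvR2, pvR3, List.isPrefixOf]
        exact hrec
      · by_cases hc2 : List.isPrefixOf pvP2 (c :: t)
        · obtain ⟨u, hu⟩ := (PySem.Chars.startswith_iff (c :: t) pvP2).mp hc2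
          have hul : u.length ≤ n := by
            have := congrArg List.length hu
            simp [pvP2] at this
            omega
          have hrec := ih u hul
            (fun hx => h1 (by rw [← hu]; exact hx.trans (List.suffix_append _ _).isInfix))
            (fun hx => h2 (by rw [← hu]; exact hx.trans (List.suffix_append _ _).isInfix))
            (fun hx => h3 (by rw [← hu]; exact hx.trans (List.suffix_append _ _).isInfix))
          rw [← hu]
          simp [pvRep, pvScan, pvP1, pvP2, pvP3, pvR1, pvR2, pvR3, List.isPrefixOf]
          exact hrec
        · by_cases hc3 : List.isPrefixOf pvP3 (c :: t)
          · obtain ⟨u, hu⟩ := (PySem.Chars.startswith_iff (c :: t) pvP3).mp hc3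
            have hul : u.length ≤ n := by
              have := congrArg List.length hu
              simp [pvP3] at this
              omega
            have hrec := ih u hul
              (fun hx => h1 (by rw [← hu]; exact hx.trans (List.suffix_append _ _).isInfix))
              (fun hx => h2 (by rw [← hu]; exact hx.trans (List.suffix_append _ _).isInfix))
              (fun hx => h3 (by rw [← hu]; exact hx.trans (List.suffix_append _ _).isInfix))
            rw [← hu]
            simp [pvRep, pvScan, pvP1, pvP2, pvP3, pvR1, pvR2, pvR3, List.isPrefixOf]
            exact hrec
          · -- no phrase matches here: every pass and the scan copy c
            rw [pvCopyA hc1 hc2 hc3 (fun hx => h1 hx.isInfix) (fun hx => h2 hx.isInfix)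
              (fun hx => h3 hx.isInfix), pvScan, if_neg hc1, if_neg hc2, if_neg hc3]
            exact congrArg (c :: ·) (ih t hlt
              (fun hx => h1 (List.infix_cons hx))
              (fun hx => h2 (List.infix_cons hx))
              (fun hx => h3 (List.infix_cons hx)))


-- inside the cascade patterns the two programs genuinely differ
theorem pvBadNil (h : pvB1 <:+: ([] : List Char) ∨ pvB2 <:+: ([] : List Char) ∨ pvB3 <:+: ([] : List Char)) :
    False := by
  rcases h with h | h | h <;> · rw [List.infix_nil] at h; simp [pvB1, pvB2, pvB3] at h

theorem pvMainDiff : ∀ n s, List.length s ≤ n →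
    (pvB1 <:+: s ∨ pvB2 <:+: s ∨ pvB3 <:+: s) →
    pvRep pvP3 pvR3 (pvRep pvP2 pvR2 (pvRep pvP1 pvR1 s)) ≠ pvScan s := by
  intro n
  induction n with
  | zero =>
    intro s hs hbad
    have : s = [] := List.eq_nil_of_length_eq_zero (Nat.le_zero.1 hs)
    subst this
    exact absurd hbad pvBadNil
  | succ n ih =>
    intro s hs hbad
    cases s with
    | nil => exact absurd hbad pvBadNil
    | cons c t =>
      have hlt : t.length ≤ n := by
        have : (c :: t).length = t.length + 1 := by simp
        omega
      by_cases hc1 : List.isPrefixOf pvP1 (c :: t)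
      · obtain ⟨u, hu⟩ := (PySem.Chars.startswith_iff (c :: t) pvP1).mp hc1
        have hul : u.length ≤ n := by
          have := congrArg List.length hu
          simp [pvP1] at this
          omega
        rw [← hu] at hbad
        have hbu : pvB1 <:+: u ∨ pvB2 <:+: u ∨ pvB3 <:+: u := by
          rcases hbad with h | h | h
          · exact Or.inl (pvNoStraddle pvP1 pvB1 (by decide) h)
          · exact Or.inr (Or.inl (pvNoStraddle pvP1 pvB2 (by decide) h))
          · exact Or.inr (Or.inr (pvNoStraddle pvP1 pvB3 (by decide) h))
        have hrec := ih u hul hbu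
        rw [← hu]
        simp [pvRep, pvScan, pvP1, pvP2, pvP3, pvR1, pvR2, pvR3, List.isPrefixOf]
        exact hrec
      · by_cases hc2 : List.isPrefixOf pvP2 (c :: t)
        · obtain ⟨u, hu⟩ := (PySem.Chars.startswith_iff (c :: t) pvP2).mp hc2
          have hul : u.length ≤ n := by
            have := congrArg List.length hu
            simp [pvP2] at this
            omega
          rw [← hu] at hbad
          have hbu : pvB1 <:+: u ∨ pvB2 <:+: u ∨ pvB3 <:+: u := by
            rcases hbad with h | h | h
            · exact Or.inl (pvNoStraddle pvP2 pvB1 (by decide) h)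
            · exact Or.inr (Or.inl (pvNoStraddle pvP2 pvB2 (by decide) h))
            · exact Or.inr (Or.inr (pvNoStraddle pvP2 pvB3 (by decide) h))
          have hrec := ih u hul hbu
          rw [← hu]
          simp [pvRep, pvScan, pvP1, pvP2, pvP3, pvR1, pvR2, pvR3, List.isPrefixOf]
          exact hrec
        · by_cases hc3 : List.isPrefixOf pvP3 (c :: t)
          · obtain ⟨u, hu⟩ := (PySem.Chars.startswith_iff (c :: t) pvP3).mp hc3
            have hul : u.length ≤ n := by
              have := congrArg List.length hu
              simp [pvP3] at this
              omega
            rw [← hu] at hbad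
            have hbu : pvB1 <:+: u ∨ pvB2 <:+: u ∨ pvB3 <:+: u := by
              rcases hbad with h | h | h
              · exact Or.inl (pvNoStraddle pvP3 pvB1 (by decide) h)
              · exact Or.inr (Or.inl (pvNoStraddle pvP3 pvB2 (by decide) h))
              · exact Or.inr (Or.inr (pvNoStraddle pvP3 pvB3 (by decide) h))
            have hrec := ih u hul hbu
            rw [← hu]
            simp [pvRep, pvScan, pvP1, pvP2, pvP3, pvR1, pvR2, pvR3, List.isPrefixOf]
            exact hrec
          · by_cases hbp1 : pvB1 <+: c :: t
            · obtain ⟨u, hu⟩ := hbp1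
              rw [← hu]
              simp [pvRep, pvScan, pvB1, pvP1, pvP2, pvP3, pvR1, pvR2, pvR3, List.isPrefixOf]
            · by_cases hbp2 : pvB2 <+: c :: t
              · obtain ⟨u, hu⟩ := hbp2
                rw [← hu]
                simp [pvRep, pvScan, pvB2, pvP1, pvP2, pvP3, pvR1, pvR2, pvR3, List.isPrefixOf]
              · by_cases hbp3 : pvB3 <+: c :: t
                · obtain ⟨u, hu⟩ := hbp3
                  rw [← hu]
                  simp [pvRep, pvScan, pvB3, pvP1, pvP2, pvP3, pvR1, pvR2, pvR3, List.isPrefixOf]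
                · have hbt : pvB1 <:+: t ∨ pvB2 <:+: t ∨ pvB3 <:+: t := by
                    rcases hbad with h | h | h
                    · rcases List.infix_cons_iff.mp h with hp | hi
                      · exact absurd hp hbp1
                      · exact Or.inl hi
                    · rcases List.infix_cons_iff.mp h with hp | hi
                      · exact absurd hp hbp2
                      · exact Or.inr (Or.inl hi)
                    · rcases List.infix_cons_iff.mp h with hp | hi
                      · exact absurd hp hbp3
                      · exact Or.inr (Or.inr hi)
                  rw [pvCopyA hc1 hc2 hc3 hbp1 hbp2 hbp3, pvScan, if_neg hc1, if_neg hc2,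
                    if_neg hc3]
                  simp only [ne_eq, List.cons.injEq, true_and]
                  exact ih t hlt hbt

-- ===== VERDICT (by name: the statement is the Claim_ definition above) =====
theorem apply_clarity_fixes_py_spec : Claim_unchanged_apply_clarity_fixes_py := by
  intro content _ hD
  have h1 : ¬ pvB1 <:+: content.toList := fun h =>
    hD (Or.inl ((PySem.Str.isIn_iff_infix _ _).mpr
      (by rw [show ("due in order to the fact that").toList = pvB1 from by decide]; exact h)))
  have h2 : ¬ pvB2 <:+: content.toList := fun h =>
    hD (Or.inr (Or.inl ((PySem.Str.isIn_iff_infix _ _).mpr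
      (by rw [show ("due to the fact thain order to").toList = pvB2 from by decide]; exact h))))
  have h3 : ¬ pvB3 <:+: content.toList := fun h =>
    hD (Or.inr (Or.inr ((PySem.Str.isIn_iff_infix _ _).mpr
      (by rw [show ("due in order to the fact thain order to").toList = pvB3 from by decide]; exact h))))
  rw [pvA_eq, pvAlt_eq]
  exact congrArg String.ofList
    (pvMainAux content.toList.length content.toList (Nat.le_refl _) h1 h2 h3)


theorem apply_clarity_fixes_py_tight : Claim_exact_apply_clarity_fixes_py := by
  intro content _ hD heq
  have hl : pvRep pvP3 pvR3 (pvRep pvP2 pvR2 (pvRep pvP1 pvR1 content.toList)) =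
      pvScan content.toList := by
    rw [pvA_eq, pvAlt_eq] at heq
    have := congrArg String.toList heq
    simpa [String.toList_ofList] using this
  have hbad : pvB1 <:+: content.toList ∨ pvB2 <:+: content.toList ∨ pvB3 <:+: content.toList := by
    rcases hD with h | h | h
    · exact Or.inl (by
        rw [← show ("due in order to the fact that").toList = pvB1 from by decide]
        exact (PySem.Str.isIn_iff_infix _ _).mp h)
    · exact Or.inr (Or.inl (by
        rw [← show ("due to the fact thain order to").toList = pvB2 from by decide]
        exact (PySem.Str.isIn_iff_infix _ _).mp h))
    · exact Or.inr (Or.inr (by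
        rw [← show ("due in order to the fact thain order to").toList = pvB3 from by decide]
        exact (PySem.Str.isIn_iff_infix _ _).mp h))
  exact pvMainDiff content.toList.length content.toList (Nat.le_refl _) hbad hl

theorem apply_clarity_fixes_py_changed : Claim_changed_apply_clarity_fixes_py := by
  unfold Claim_changed_apply_clarity_fixes_py; decide
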